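-- pv_equiv track=rewrite | github.com/Yibin-Li02/CMEECourseWork | week2/code/align_seqs.py | find_best_alignment
-- ===== SOURCE A (Python) =====
-- def calculate_score(s1, s2, l1, l2, startpoint):
--
--     """
--     Calculate the result score of two sequences aligment.
--     The score is determined by the matching base pairs.
--     """
--
--     matched = ""
--     score = 0
--
--     for i in range(l2):
--         if (i + startpoint) < l1:
--             if s1[i + startpoint] == s2[i]:  # if the bases match
--                 matched += "*"
--                 score += 1
--             else:
--                 matched += "-"
--
--     return matched, score
--
-- def find_best_alignment(s1, s2):
--
--     """
--     Reading sequences from a CSV file and ensuring that there are at least two sequences to proceed.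
--     If the condition is true, which means less than two sequences, a message is printed and exists the function.
--     """
--
--     l1 = len(s1)
--     l2 = len(s2)
--     best_align = None
--     best_score = -1
--
--     for i in range(l1):  # Check all possible starting points
--         _, score = calculate_score(s1, s2, l1, l2, i)
--         if score > best_score:
--             best_align = "." * i + s2  # Save best alignment
--             best_score = score
--
--     return best_align, best_score
-- ===== SOURCE B (Python) =====
-- def find_best_alignment(s1, s2):
--     # Inverted index of character positions in s2; score every offset in one
--     # sweep over the matching (position, position) pairs instead of rescanning
--     # s2 for each startpoint.
--     pos2 = {}
--     for j, c in enumerate(s2):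
--         pos2[c] = pos2.get(c, []) + [j]
--     scores = {}
--     for p, c in enumerate(s1):
--         for j in pos2.get(c, []):
--             off = p - j
--             if off >= 0:
--                 scores[off] = scores.get(off, 0) + 1
--     best_i = None
--     best_score = -1
--     for i in range(len(s1)):
--         sc = scores.get(i, 0)
--         if sc > best_score:
--             best_i = i
--             best_score = sc
--     if best_i is None:
--         return None, -1
--     return "." * best_i + s2, best_score
-- ===== Notes on version B (the rewrite author's own statement) =====
-- stated objective: faster
-- what changed: Instead of rescanning s2 against s1 for every startpoint, B builds an inverted index of character positions in s2 and tallies one score per offset in a single sweep over the matching position pairs, then picks the first maximal offset.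
import Mathlib
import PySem

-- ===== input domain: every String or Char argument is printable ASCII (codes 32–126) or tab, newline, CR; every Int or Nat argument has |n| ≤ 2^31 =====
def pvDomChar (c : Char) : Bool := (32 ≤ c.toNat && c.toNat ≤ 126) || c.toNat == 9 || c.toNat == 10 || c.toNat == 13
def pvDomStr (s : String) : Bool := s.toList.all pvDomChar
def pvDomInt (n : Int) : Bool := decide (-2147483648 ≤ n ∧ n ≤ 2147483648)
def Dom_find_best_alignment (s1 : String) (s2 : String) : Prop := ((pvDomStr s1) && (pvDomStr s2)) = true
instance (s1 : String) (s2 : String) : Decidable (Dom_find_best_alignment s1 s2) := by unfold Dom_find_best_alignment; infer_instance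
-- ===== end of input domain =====

-- B replaces A's per-startpoint rescan of s2 by an inverted index of s2's character
-- positions and one sweep over the matching position pairs (objective: faster on
-- real text by the alphabet factor; same worst case).

-- ===== PORT A =====
-- literal port of calculate_score; the Option equality of pyGet? is exact on every
-- index reachable from find_best_alignment (the guard i + startpoint < l1 keeps
-- s1's index in range, and i < l2 keeps s2's).
def calculate_score (s1 : String) (s2 : String) (l1 : Int) (l2 : Int) (startpoint : Int) : String × Int :=
  (PySem.List.pyRange 0 l2 1).foldl (fun (st : String × Int) i =>
    if i + startpoint < l1 then
      if PySem.Str.pyGet? s1 (i + startpoint) == PySem.Str.pyGet? s2 i then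
        (st.1 ++ "*", st.2 + 1)
      else
        (st.1 ++ "-", st.2)
    else st) ("", 0)

def find_best_alignment (s1 : String) (s2 : String) : Option String × Int :=
  let l1 : Int := PySem.Str.len s1
  let l2 : Int := PySem.Str.len s2
  (PySem.List.pyRange 0 l1 1).foldl (fun (st : Option String × Int) i =>
    let score := (calculate_score s1 s2 l1 l2 i).2
    if st.2 < score then
      (some (String.ofList (PySem.List.pyRepeat ['.'] i ++ s2.toList)), score)  -- "." * i + s2
    else st) (none, -1)

-- ===== PORT B =====
def find_best_alignment_alt (s1 : String) (s2 : String) : Option String × Int :=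
  -- pos2[c] = pos2.get(c, []) + [j]
  let pos2 : PySem.Dict Char (List Int) :=
    (PySem.List.enumerate s2.toList 0).foldl
      (fun d jc => d.modify jc.2 [] (· ++ [jc.1])) PySem.Dict.empty
  -- scores[off] = scores.get(off, 0) + 1  (only for off >= 0)
  let scores : PySem.Dict Int Int :=
    (PySem.List.enumerate s1.toList 0).foldl
      (fun d pc => (pos2.getD pc.2 []).foldl
        (fun d j => if 0 ≤ pc.1 - j then d.modify (pc.1 - j) 0 (· + 1) else d) d)
      PySem.Dict.empty
  let res : Option Int × Int :=
    (PySem.List.pyRange 0 (PySem.Str.len s1) 1).foldl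
      (fun (st : Option Int × Int) i =>
        if st.2 < scores.getD i 0 then (some i, scores.getD i 0) else st)
      (none, -1)
  match res.1 with
  | none => (none, -1)
  | some i => (some (String.ofList (PySem.List.pyRepeat ['.'] i ++ s2.toList)), res.2)  -- "." * i + s2

-- ===== PRECONDITION & SPEC =====
def Spec_find_best_alignment (s1 : String) (s2 : String) (out : Option String × Int) : Prop := out = find_best_alignment_alt s1 s2
instance (s1 : String) (s2 : String) (out : Option String × Int) : Decidable (Spec_find_best_alignment s1 s2 out) := by unfold Spec_find_best_alignment; infer_instance

-- ===== CLAIM (what is proved, stated in full; the proofs are below) =====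
def Claim_equal_find_best_alignment : Prop := ∀ (s1 : String) (s2 : String), Dom_find_best_alignment s1 s2 → Spec_find_best_alignment s1 s2 (find_best_alignment s1 s2)

-- ===== LEMMAS AND PROOFS =====


-- proof-local abbreviations (used only by the lemmas below)

def mkA (s2 : String) (i : Int) : String := String.ofList (PySem.List.pyRepeat ['.'] i ++ s2.toList)

def idx (b : List Char) (c : Char) : List Int :=
  ((PySem.List.enumerate b 0).filter (fun jc => jc.2 == c)).map (·.1)

def pos2D (b : List Char) : PySem.Dict Char (List Int) :=
  (PySem.List.enumerate b 0).foldl (fun d jc => d.modify jc.2 [] (· ++ [jc.1])) PySem.Dict.empty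

def scoresD (a b : List Char) : PySem.Dict Int Int :=
  (PySem.List.enumerate a 0).foldl
    (fun d pc => ((pos2D b).getD pc.2 []).foldl
      (fun d j => if 0 ≤ pc.1 - j then d.modify (pc.1 - j) 0 (· + 1) else d) d)
    PySem.Dict.empty

def matchCount (a b : List Char) (t : Nat) : Nat :=
  (List.range b.length).countP (fun (j : Nat) => decide ((j : Int) + t < (a.length : Int)) && (a[j + t]? == b[j]?))

def PairRel (s2 : String) (sa : Option String × Int) (sb : Option Int × Int) : Prop :=
  sa.2 = sb.2 ∧
    ((sa.1 = none ∧ sb.1 = none ∧ sa.2 = -1) ∨ ∃ i : Int, sb.1 = some i ∧ sa.1 = some (mkA s2 i))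

-- A's score, characterised as a count of matching positions
theorem calc_score_eq (s1 s2 : String) (t : Nat) :
    (calculate_score s1 s2 (PySem.Str.len s1) (PySem.Str.len s2) (t : Int)).2
      = (matchCount s1.toList s2.toList t : Int) := by
  unfold calculate_score matchCount
  rw [PySem.Str.len_eq, PySem.Str.len_eq, PySem.List.pyRange_zero_natCast, List.foldl_map]
  have hget1 : ∀ k : Nat, PySem.Str.pyGet? s1 ((k : Int) + (t : Int)) = s1.toList[k + t]? := by
    intro k
    rw [PySem.Str.pyGet?_eq]
    have hc : ((k : Int) + (t : Int)) = ((k + t : Nat) : Int) := by push_cast; ring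
    rw [hc]
    exact PySem.List.pyGet?_natCast ..
  have hget2 : ∀ k : Nat, PySem.Str.pyGet? s2 ((k : Int)) = s2.toList[k]? := by
    intro k
    rw [PySem.Str.pyGet?_eq]
    exact PySem.List.pyGet?_natCast ..
  have hstep : (List.range s2.toList.length).foldl
      (fun (st : String × Int) (k : Nat) =>
        if (k : Int) + (t : Int) < (s1.toList.length : Int) then
          if PySem.Str.pyGet? s1 ((k : Int) + (t : Int)) == PySem.Str.pyGet? s2 ((k : Int)) then
            (st.1 ++ "*", st.2 + 1)
          else (st.1 ++ "-", st.2)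
        else st) ("", 0)
      = (List.range s2.toList.length).foldl
        (fun (st : String × Int) (k : Nat) =>
          ((fun (m : String) (k : Nat) =>
              if (k : Int) + (t : Int) < (s1.toList.length : Int) then
                (if s1.toList[k + t]? == s2.toList[k]? then m ++ "*" else m ++ "-")
              else m) st.1 k,
           (fun (sc : Int) (k : Nat) =>
              if ((k : Int) + (t : Int) < (s1.toList.length : Int) ∧
                  (s1.toList[k + t]? == s2.toList[k]?) = true) then sc + 1 else sc) st.2 k)) ("", 0) := by
    apply PySem.List.foldl_congr_mem
    intro st k _
    rw [hget1 k, hget2 k]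
    by_cases h1 : (k : Int) + (t : Int) < (s1.toList.length : Int)
    · by_cases h2 : (s1.toList[k + t]? == s2.toList[k]?) = true
      · have h12 : (k : Int) + (t : Int) < (s1.toList.length : Int) ∧
            (s1.toList[k + t]? == s2.toList[k]?) = true := ⟨h1, h2⟩
        simp only [if_pos h1, if_pos h2, if_pos h12]
      · have h12 : ¬ ((k : Int) + (t : Int) < (s1.toList.length : Int) ∧
            (s1.toList[k + t]? == s2.toList[k]?) = true) := fun h => h2 h.2
        simp only [if_pos h1, if_neg h2, if_neg h12]
    · have h12 : ¬ ((k : Int) + (t : Int) < (s1.toList.length : Int) ∧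
          (s1.toList[k + t]? == s2.toList[k]?) = true) := fun h => h1 h.1
      simp only [if_neg h1, if_neg h12]
  rw [hstep, PySem.List.foldl_prod_mk
    (f := fun (m : String) (k : Nat) =>
      if (k : Int) + (t : Int) < (s1.toList.length : Int) then
        (if s1.toList[k + t]? == s2.toList[k]? then m ++ "*" else m ++ "-")
      else m)
    (g := fun (sc : Int) (k : Nat) =>
      if ((k : Int) + (t : Int) < (s1.toList.length : Int) ∧
          (s1.toList[k + t]? == s2.toList[k]?) = true) then sc + 1 else sc)]
  rw [PySem.List.foldl_ite_add_one
    (p := fun (k : Nat) => (k : Int) + (t : Int) < (s1.toList.length : Int) ∧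
      (s1.toList[k + t]? == s2.toList[k]?) = true)]
  simp only [zero_add]
  congr 1
  apply List.countP_congr
  intro k _
  cases hX : (s1.toList[k + t]? == s2.toList[k]?) <;> simp

-- B's inverted index: positions of c in b, in order
theorem pos2D_getD (b : List Char) (c : Char) :
    (pos2D b).getD c [] = idx b c := by
  unfold pos2D idx
  have h : (PySem.List.enumerate b 0).foldl (fun d jc => d.modify jc.2 [] (· ++ [jc.1]))
        (PySem.Dict.empty : PySem.Dict Char (List Int))
      = ((PySem.List.enumerate b 0).map (fun jc => (jc.2, jc.1))).foldl
          (fun d p => d.modify p.1 [] (· ++ [p.2])) PySem.Dict.empty := by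
    rw [List.foldl_map]
  rw [h, PySem.Dict.getD_foldl_modify_append]
  simp only [PySem.Dict.getD_empty, List.filter_map, List.map_map, List.nil_append]
  rfl

theorem idx_nodup (b : List Char) (c : Char) : (idx b c).Nodup := by
  unfold idx
  have h := (PySem.List.pairwise_lt_enumerate b 0).filter (fun jc => jc.2 == c)
  show (List.map _ _).Pairwise (· ≠ ·)
  rw [List.pairwise_map]
  exact h.imp ne_of_lt

theorem mem_idx (b : List Char) (c : Char) (v : Int) :
    v ∈ idx b c ↔ 0 ≤ v ∧ b[v.toNat]? = some c := by
  unfold idx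
  simp only [List.mem_map, List.mem_filter, PySem.List.mem_enumerate_iff]
  constructor
  · rintro ⟨⟨j, ch⟩, ⟨⟨k, hk, heq⟩, hc⟩, rfl⟩
    obtain ⟨h1, h2⟩ := Prod.mk.injEq .. ▸ heq
    subst h1 h2
    simp only at hc ⊢
    refine ⟨by omega, ?_⟩
    have : ((0 : Int) + (k : Int)).toNat = k := by omega
    rw [this, List.getElem?_eq_getElem hk]
    simpa using hc
  · rintro ⟨h0, hsome⟩
    rw [List.getElem?_eq_some_iff] at hsome
    obtain ⟨hk, hv⟩ := hsome
    refine ⟨(v, c), ⟨⟨v.toNat, hk, ?_⟩, by simp⟩, rfl⟩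
    rw [Prod.ext_iff]
    exact ⟨by omega, hv.symm⟩

-- count of one offset among the matches contributed by position p of character c
theorem idx_offset_count (b : List Char) (c : Char) (p t : Int) (ht : 0 ≤ t) :
    (((idx b c).filter (fun j => decide (0 ≤ p - j))).map (fun j => p - j)).count t
      = if 0 ≤ p - t ∧ b[(p - t).toNat]? = some c then 1 else 0 := by
  rw [List.count_eq_countP, List.countP_map, List.countP_filter]
  have hcongr : ((idx b c).countP fun j => ((fun x => x == t) ∘ fun j => p - j) j && decide (0 ≤ p - j))
      = (idx b c).countP (fun j => j == p - t) := by
    apply List.countP_congr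
    intro j _
    by_cases hj : j = p - t
    · subst hj
      have e1 : p - (p - t) = t := by omega
      simp [e1, ht]
    · have e1 : p - j ≠ t := by omega
      simp [e1, hj]
  rw [hcongr, ← List.count_eq_countP, (idx_nodup b c).count]
  simp [mem_idx]

-- the scores loop, unrolled to a sum of per-position contributions
theorem scoresD_foldl (b : List Char) (l : List (Int × Char)) (d : PySem.Dict Int Int) (t : Int) :
    (l.foldl
      (fun (d : PySem.Dict Int Int) (pc : Int × Char) => ((pos2D b).getD pc.2 []).foldl
        (fun d j => if 0 ≤ pc.1 - j then d.modify (pc.1 - j) 0 (· + 1) else d) d) d).getD t 0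
      = d.getD t 0 +
        (l.map (fun (pc : Int × Char) =>
          (((((pos2D b).getD pc.2 []).filter (fun j => decide (0 ≤ pc.1 - j))).map
            (fun j => pc.1 - j)).count t : Int))).sum := by
  induction l generalizing d with
  | nil => simp
  | cons pc l ih =>
    simp only [List.foldl_cons, List.map_cons, List.sum_cons]
    rw [ih]
    have hstep : (((pos2D b).getD pc.2 []).foldl
        (fun d j => if 0 ≤ pc.1 - j then d.modify (pc.1 - j) 0 (· + 1) else d) d).getD t 0
        = d.getD t 0 +
          (((((pos2D b).getD pc.2 []).filter (fun j => decide (0 ≤ pc.1 - j))).map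
            (fun j => pc.1 - j)).count t : Int) := by
      have h1 : ((pos2D b).getD pc.2 []).foldl
          (fun d j => if 0 ≤ pc.1 - j then d.modify (pc.1 - j) 0 (· + 1) else d) d
          = (((pos2D b).getD pc.2 []).filter (fun j => decide (0 ≤ pc.1 - j))).foldl
              (fun d j => d.modify (pc.1 - j) 0 (· + 1)) d := by
        rw [List.foldl_filter]
        apply PySem.List.foldl_congr_mem
        intro acc x _
        simp
      have h2 : (((pos2D b).getD pc.2 []).filter (fun j => decide (0 ≤ pc.1 - j))).foldl
            (fun d j => d.modify (pc.1 - j) 0 (· + 1)) d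
          = ((((pos2D b).getD pc.2 []).filter (fun j => decide (0 ≤ pc.1 - j))).map
              (fun j => pc.1 - j)).foldl (fun d o => d.modify o 0 (· + 1)) d := by
        rw [List.foldl_map]
      rw [h1, h2, PySem.Dict.getD_foldl_modify_add_one]
    rw [hstep]
    ring

theorem countP_range_restrict (r n : Nat) (G : Nat → Bool) (hG : ∀ j, G j = true → j < n) :
    (List.range r).countP G = (List.range n).countP (fun j => decide (j < r) && G j) := by
  rcases le_total r n with hrn | hnr
  · have : n = r + (n - r) := by omega
    rw [this, List.range_add, List.countP_append, List.countP_map]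
    have h1 : (List.range r).countP (fun j => decide (j < r) && G j) = (List.range r).countP G := by
      apply List.countP_congr
      intro j hj
      simp only [List.mem_range] at hj
      simp [hj]
    have h2 : (List.range (n - r)).countP ((fun j => decide (j < r) && G j) ∘ (r + ·)) = 0 := by
      rw [List.countP_eq_zero]
      intro j _
      simp
    rw [h1, h2]
    omega
  · have : r = n + (r - n) := by omega
    rw [this, List.range_add, List.countP_append, List.countP_map]
    have h1 : (List.range n).countP (fun j => decide (j < n + (r - n)) && G j)
        = (List.range n).countP G := by
      apply List.countP_congr
      intro j hj
      simp only [List.mem_range] at hj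
      have hj2 : j < n + (r - n) := by omega
      simp [hj2]
    have h2 : (List.range (r - n)).countP (G ∘ (n + ·)) = 0 := by
      rw [List.countP_eq_zero]
      intro j _
      simp only [Function.comp]
      by_contra hG'
      have := hG _ (by simpa using hG')
      omega
    rw [h1, h2]
    omega

theorem countP_shift (m n tn : Nat) (htm : tn ≤ m) (G : Nat → Bool)
    (hG : ∀ j, G j = true → j < n) :
    (List.range m).countP (fun k => decide (tn ≤ k) && G (k - tn))
      = (List.range n).countP (fun j => decide (j + tn < m) && G j) := by
  have hm : m = tn + (m - tn) := by omega
  rw [hm, List.range_add, List.countP_append, List.countP_map]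
  have h1 : (List.range tn).countP (fun k => decide (tn ≤ k) && G (k - tn)) = 0 := by
    rw [List.countP_eq_zero]
    intro k hk
    simp only [List.mem_range] at hk
    have hk2 : ¬ tn ≤ k := by omega
    simp [hk2]
  have h2 : (List.range (m - tn)).countP ((fun k => decide (tn ≤ k) && G (k - tn)) ∘ (tn + ·))
      = (List.range (m - tn)).countP G := by
    apply List.countP_congr
    intro j _
    simp
  have h3 : (List.range n).countP (fun j => decide (j + tn < tn + (m - tn)) && G j)
      = (List.range n).countP (fun j => decide (j < m - tn) && G j) := by
    apply List.countP_congr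
    intro j _
    have hiff : (j + tn < tn + (m - tn)) ↔ (j < m - tn) := by omega
    simp [hiff]
  rw [h1, h2, h3, ← countP_range_restrict (m - tn) n G hG]
  omega

-- B's score at offset t equals A's match count
theorem scoresD_getD (a b : List Char) (t : Nat) (htm : t < a.length) :
    (scoresD a b).getD (t : Int) 0 = (matchCount a b t : Int) := by
  unfold scoresD
  rw [scoresD_foldl]
  rw [PySem.List.enumerate_eq_map_pyRange a ' ', List.map_map]
  have hlen : PySem.List.len a = (a.length : Int) := rfl
  rw [hlen, PySem.List.pyRange_zero_natCast, List.map_map]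
  have hmap : (List.range a.length).map
        (((fun (pc : Int × Char) =>
            (((((pos2D b).getD pc.2 []).filter (fun j => decide (0 ≤ pc.1 - j))).map
              (fun j => pc.1 - j)).count (t : Int) : Int)) ∘
          (fun j => (j, PySem.List.pyGetD a j ' '))) ∘ (fun (k : Nat) => (k : Int)))
      = (List.range a.length).map
          (fun (k : Nat) => if (decide (t ≤ k) && (b[k - t]? == a[k]?)) = true then (1 : Int) else 0) := by
    apply List.map_congr_left
    intro k hk
    simp only [List.mem_range] at hk
    simp only [Function.comp_apply]
    have hpg : PySem.List.pyGetD a (k : Int) ' ' = a[k] :=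
      PySem.List.pyGetD_eq_getElem a ' ' (by omega) (by omega)
    rw [pos2D_getD, hpg,
      idx_offset_count b (a[k]) ((k : Int)) ((t : Int)) (by omega)]
    by_cases hkt : t ≤ k
    · have h1 : (0 : Int) ≤ (k : Int) - (t : Int) := by omega
      have h2 : ((k : Int) - (t : Int)).toNat = k - t := by omega
      rw [h2]
      have ha : a[k]? = some a[k] := List.getElem?_eq_getElem hk
      by_cases hb : b[k - t]? = some a[k]
      · simp [hb, hkt, ha]
      · have hne : ¬ (b[k - t]? == a[k]?) = true := by
          rw [ha]
          simpa using hb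
        simp [hb, hkt, hne]
    · simp [hkt]
  rw [hmap, PySem.List.sum_map_ite_one_zero]
  rw [PySem.Dict.getD_empty, zero_add]
  congr 1
  unfold matchCount
  have hL : (List.range a.length).countP (fun k => decide (t ≤ k) && (b[k - t]? == a[k]?))
      = (List.range a.length).countP (fun k => decide (t ≤ k) &&
          ((fun j => decide (j < b.length) && (b[j]? == a[j + t]?)) (k - t))) := by
    apply List.countP_congr
    intro k hk
    simp only [List.mem_range] at hk
    by_cases h1 : t ≤ k
    · have e : k - t + t = k := by omega
      by_cases h2 : k - t < b.length
      · simp [h2, e]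
      · have hb : b[k - t]? = none := List.getElem?_eq_none (by omega)
        have ha : a[k]? = some a[k] := List.getElem?_eq_getElem hk
        simp [h2, ha]
    · simp [h1]
  rw [hL, countP_shift a.length b.length t (by omega)
      (fun j => decide (j < b.length) && (b[j]? == a[j + t]?))
      (fun j hj => by
        rcases Bool.and_eq_true .. ▸ hj with ⟨hj1, _⟩
        simpa using hj1)]
  apply List.countP_congr
  intro j hj
  simp only [List.mem_range] at hj
  have e1 : ((j : Int) + (t : Int) < (a.length : Int)) ↔ (j + t < a.length) := by omega
  by_cases h1 : j + t < a.length
  · simp [h1, hj, e1]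
    exact eq_comm
  · simp [h1, e1]

-- the two selection loops, related step by step
theorem final_fold (s2 : String) (scoreA scoreB : Int → Int) (L : List Int)
    (h : ∀ i ∈ L, scoreA i = scoreB i) (sa : Option String × Int) (sb : Option Int × Int)
    (hrel : PairRel s2 sa sb) :
    PairRel s2
      (L.foldl (fun st i => if st.2 < scoreA i then (some (mkA s2 i), scoreA i) else st) sa)
      (L.foldl (fun st i => if st.2 < scoreB i then (some i, scoreB i) else st) sb) := by
  induction L generalizing sa sb with
  | nil => exact hrel
  | cons i L ih =>
    simp only [List.foldl_cons]
    refine ih (fun j hj => h j (List.mem_cons_of_mem _ hj)) _ _ ?_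
    have hi : scoreA i = scoreB i := h i (List.mem_cons_self ..)
    obtain ⟨h2, hd⟩ := hrel
    by_cases hc : sb.2 < scoreB i
    · rw [hi, h2, if_pos hc, if_pos hc]
      exact ⟨rfl, Or.inr ⟨i, rfl, rfl⟩⟩
    · rw [hi, h2, if_neg hc, if_neg hc]
      exact ⟨h2, hd⟩

theorem main_eq (s1 s2 : String) : find_best_alignment s1 s2 = find_best_alignment_alt s1 s2 := by
  show (PySem.List.pyRange 0 (PySem.Str.len s1) 1).foldl
      (fun (st : Option String × Int) i =>
        if st.2 < (calculate_score s1 s2 (PySem.Str.len s1) (PySem.Str.len s2) i).2 then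
          (some (mkA s2 i), (calculate_score s1 s2 (PySem.Str.len s1) (PySem.Str.len s2) i).2)
        else st) (none, -1)
    = (match ((PySem.List.pyRange 0 (PySem.Str.len s1) 1).foldl
        (fun (st : Option Int × Int) i =>
          if st.2 < (scoresD s1.toList s2.toList).getD i 0 then
            (some i, (scoresD s1.toList s2.toList).getD i 0) else st) (none, -1)).1 with
      | none => (none, -1)
      | some i => (some (mkA s2 i),
          ((PySem.List.pyRange 0 (PySem.Str.len s1) 1).foldl
            (fun (st : Option Int × Int) i =>
              if st.2 < (scoresD s1.toList s2.toList).getD i 0 then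
                (some i, (scoresD s1.toList s2.toList).getD i 0) else st) (none, -1)).2))
  have hscore : ∀ i ∈ PySem.List.pyRange 0 (PySem.Str.len s1) 1,
      (fun i => (calculate_score s1 s2 (PySem.Str.len s1) (PySem.Str.len s2) i).2) i
        = (fun i => (scoresD s1.toList s2.toList).getD i 0) i := by
    intro i hi
    rw [PySem.List.mem_pyRange_one] at hi
    rw [PySem.Str.len_eq] at hi
    have hcast : i = ((i.toNat : Nat) : Int) := by omega
    simp only []
    rw [hcast, calc_score_eq, scoresD_getD s1.toList s2.toList i.toNat (by omega)]
  have hinit : PairRel s2 ((none, -1) : Option String × Int) ((none, -1) : Option Int × Int) := by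
    unfold PairRel
    exact ⟨rfl, Or.inl ⟨rfl, rfl, rfl⟩⟩
  have hrel := final_fold s2
    (fun i => (calculate_score s1 s2 (PySem.Str.len s1) (PySem.Str.len s2) i).2)
    (fun i => (scoresD s1.toList s2.toList).getD i 0)
    (PySem.List.pyRange 0 (PySem.Str.len s1) 1) hscore (none, -1) (none, -1) hinit
  unfold PairRel at hrel
  simp only [] at hrel
  obtain ⟨h2, hd⟩ := hrel
  rcases hd with ⟨ha, hb, hv⟩ | ⟨i, hb, ha⟩
  · rw [hb]
    exact Prod.ext_iff.mpr ⟨ha, hv⟩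
  · rw [hb]
    exact Prod.ext_iff.mpr ⟨ha, h2⟩

-- ===== VERDICT (by name: the statement is the Claim_ definition above) =====
theorem find_best_alignment_spec : Claim_equal_find_best_alignment := by
  intro s1 s2 _
  exact main_eq s1 s2
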